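-- pv_equiv track=rewrite | github.com/tomasfn87/python | int_py_pt2/07-recursao/exc-elefantes.py | elefantes
-- ===== SOURCE A (Python) =====
-- def incomodam(n, ready=False, frase=""):
--     if ready == False:
--         if n < 1:
--             return incomodam(n, True)
--         else:
--             frase = incomodam(0)
--             for i in range(0, n):
--                 frase += ("incomodam ")
--             return incomodam(n, True, frase)
--     else:
--         return frase
--
-- def elefantes(n, ready=False, frase=incomodam(0)):
--     if ready == False:
--         if n < 1:
--             return elefantes(n, True)
--         else:
--             for i in range(1, n + 1):
--                 if i == 1:
--                     frase += "Um elefante incomoda muita gente"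
--                 else:
--                     frase += "\n" + str(i) + " elefantes " + incomodam(i) \
--                              + "muito mais"
--                     if i == n:
--                         break
--                     else:
--                         frase += "\n" + str(i) + " elefantes " + incomodam(1) \
--                                  + "muita gente"
--             return elefantes(n, True, frase)
--     else:
--         return frase
-- ===== SOURCE B (Python) =====
-- def elefantes(n, ready=False, frase=""):
--     # Single pass: the "incomodam " run grows incrementally; pieces are
--     # collected in a list and joined once at the end (O(total length)).
--     if ready:
--         return frase
--     if n < 1:
--         return ""
--     parts = [frase, "Um elefante incomoda muita gente"]
--     inc = "incomodam "
--     for i in range(2, n + 1):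
--         inc += "incomodam "
--         parts.append("\n" + str(i) + " elefantes " + inc + "muito mais")
--         if i < n:
--             parts.append("\n" + str(i) + " elefantes incomodam muita gente")
--     return "".join(parts)
-- ===== Notes on version B (the rewrite author's own statement) =====
-- stated objective: alternative
-- what changed: B builds each verse in a single pass, growing the 'incomodam ' run incrementally and joining collected pieces once, instead of A's recursive scheme that re-derives 'incomodam '*i from scratch via the recursive helper for every verse and repeatedly concatenates onto one growing string.
import Mathlib
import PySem

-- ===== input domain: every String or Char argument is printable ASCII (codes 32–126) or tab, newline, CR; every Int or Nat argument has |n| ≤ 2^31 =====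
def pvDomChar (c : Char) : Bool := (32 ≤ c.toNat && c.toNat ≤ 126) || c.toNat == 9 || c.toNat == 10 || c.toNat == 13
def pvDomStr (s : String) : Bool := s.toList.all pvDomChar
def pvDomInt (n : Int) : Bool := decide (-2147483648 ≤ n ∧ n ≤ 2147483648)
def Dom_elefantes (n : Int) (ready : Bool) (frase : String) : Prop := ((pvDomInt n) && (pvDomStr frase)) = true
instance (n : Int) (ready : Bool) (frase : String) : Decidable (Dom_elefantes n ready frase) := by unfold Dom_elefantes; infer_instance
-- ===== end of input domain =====

-- B builds the song in one pass, growing the "incomodam " run incrementally and joining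
-- collected pieces once, instead of A's per-verse recursive rebuild (objective: alternative).

-- ===== PORT A =====
-- literal port of the helper incomodam(n, ready=False, frase="")
def incomodamA (n : Int) (ready : Bool) (frase : String) : String :=
  if ready = false then
    if n < 1 then
      incomodamA n true ""
    else
      incomodamA n true
        ((PySem.List.pyRange 0 n 1).foldl (fun f _ => f ++ "incomodam ") (incomodamA 0 false ""))
  else frase
termination_by ((if ready then 0 else if n < 1 then 1 else 2) : Nat)
decreasing_by all_goals (simp_all; try (split <;> omega))

-- the for-loop of elefantes, with the 'break' as an early return
def elefLoopA (n : Int) : List Int → String → String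
  | [], frase => frase
  | i :: rest, frase =>
    if i = 1 then
      elefLoopA n rest (frase ++ "Um elefante incomoda muita gente")
    else
      let frase := frase ++ "\n" ++ PySem.Int.toStr i ++ " elefantes " ++ incomodamA i false "" ++ "muito mais"
      if i = n then frase
      else elefLoopA n rest (frase ++ "\n" ++ PySem.Int.toStr i ++ " elefantes " ++ incomodamA 1 false "" ++ "muita gente")

def elefantes (n : Int) (ready : Bool) (frase : String) : String :=
  if ready = false then
    if n < 1 then elefantes n true (incomodamA 0 false "")   -- default frase = incomodam(0)
    else elefantes n true (elefLoopA n (PySem.List.pyRange 1 (n + 1) 1) frase)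
  else frase
termination_by ((if ready then 0 else 1) : Nat)
decreasing_by all_goals simp_all

-- ===== PORT B =====
-- loop body of Source B: grow the run, append the verse pieces
def stepB (n : Int) (st : String × List String) (i : Int) : String × List String :=
  let inc := st.1 ++ "incomodam "
  let parts := st.2 ++ ["\n" ++ PySem.Int.toStr i ++ " elefantes " ++ inc ++ "muito mais"]
  let parts := if i < n then parts ++ ["\n" ++ PySem.Int.toStr i ++ " elefantes incomodam muita gente"] else parts
  (inc, parts)

def elefantes_alt (n : Int) (ready : Bool) (frase : String) : String :=
  if ready then frase
  else if n < 1 then ""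
  else
    let st := (PySem.List.pyRange 2 (n + 1) 1).foldl (stepB n)
      ("incomodam ", [frase, "Um elefante incomoda muita gente"])
    PySem.Str.join "" st.2

-- ===== PRECONDITION & SPEC =====
def Spec_elefantes (n : Int) (ready : Bool) (frase : String) (out : String) : Prop := out = elefantes_alt n ready frase
instance (n : Int) (ready : Bool) (frase : String) (out : String) : Decidable (Spec_elefantes n ready frase out) := by unfold Spec_elefantes; infer_instance

-- ===== CLAIM (what is proved, stated in full; the proofs are below) =====
def Claim_equal_elefantes : Prop := ∀ (n : Int) (ready : Bool) (frase : String), Dom_elefantes n ready frase → Spec_elefantes n ready frase (elefantes n ready frase)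

-- ===== LEMMAS AND PROOFS =====

/-- `rep k` = "incomodam " repeated `k` times. -/
def rep : Nat → String
  | 0 => ""
  | k + 1 => "incomodam " ++ rep k

theorem rep_snoc (k : Nat) : rep k ++ "incomodam " = rep (k + 1) := by
  induction k with
  | zero => simp [rep]
  | succ k ih => simp only [rep, String.append_assoc, ih]

theorem rep_comm (k : Nat) : "incomodam " ++ rep k = rep k ++ "incomodam " := by
  rw [rep_snoc, rep]

theorem foldl_inc (L : List Int) (s : String) :
    L.foldl (fun f _ => f ++ "incomodam ") s = s ++ rep L.length := by
  induction L generalizing s with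
  | nil => simp [rep]
  | cons h t ih =>
    rw [List.foldl_cons, ih, List.length_cons, ← rep_snoc, String.append_assoc, rep_comm]

theorem incomodamA_true (n : Int) (f : String) : incomodamA n true f = f := by
  rw [incomodamA]; simp

theorem incomodamA_zero : incomodamA 0 false "" = "" := by
  rw [incomodamA]; simp [incomodamA_true]

theorem incomodamA_pos (i : Int) (h : 1 ≤ i) : incomodamA i false "" = rep i.toNat := by
  rw [incomodamA]
  simp only [if_neg (by omega : ¬ i < 1), incomodamA_true, incomodamA_zero,
    foldl_inc, PySem.List.length_pyRange_one]
  simp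

theorem elefantes_true (n : Int) (f : String) : elefantes n true f = f := by
  rw [elefantes]; simp

theorem chars_join_snoc (l : List (List Char)) (x : List Char) :
    PySem.Chars.join [] (l ++ [x]) = PySem.Chars.join [] l ++ x := by
  induction l with
  | nil => simp [PySem.Chars.join_nil, PySem.Chars.join_singleton]
  | cons h t ih =>
    cases t with
    | nil => simp [PySem.Chars.join_singleton, PySem.Chars.join_cons_cons]
    | cons h2 t2 =>
      simp only [List.cons_append, PySem.Chars.join_cons_cons] at *
      simp [ih]

theorem join_snoc (l : List String) (x : String) :
    PySem.Str.join "" (l ++ [x]) = PySem.Str.join "" l ++ x := by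
  apply String.ext
  simp [PySem.Str.toList_join, chars_join_snoc]

theorem join_pair (x y : String) : PySem.Str.join "" [x, y] = x ++ y := by
  apply String.ext
  simp [PySem.Str.toList_join, PySem.Chars.join_cons_cons, PySem.Chars.join_singleton]

theorem loop_eq (m : Nat) : ∀ (n a : Int) (s inc : String) (parts : List String),
    2 ≤ a → a + (m : Int) = n + 1 → s = PySem.Str.join "" parts → inc = rep (a - 1).toNat →
    elefLoopA n (PySem.List.pyRange a (a + (m : Int)) 1) s
      = PySem.Str.join "" ((PySem.List.pyRange a (a + (m : Int)) 1).foldl (stepB n) (inc, parts)).2 := by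
  induction m with
  | zero =>
    intro n a s inc parts _ _ hs _
    rw [PySem.List.pyRange_one_eq_nil (by omega)]
    simpa [elefLoopA] using hs
  | succ k ih =>
    intro n a s inc parts ha hm hs hinc
    have hmn : a + (k : Int) + 1 = n + 1 := by push_cast at hm; omega
    have hrep : inc ++ "incomodam " = rep a.toNat := by
      rw [hinc, rep_snoc]; congr 1; omega
    rcases Nat.eq_zero_or_pos k with hk | hk
    · -- last verse: i = n, the break fires
      subst hk
      have han : a = n := by omega
      rw [show a + ((0 + 1 : Nat) : Int) = a + 1 by push_cast; ring,
        PySem.List.pyRange_one_singleton]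
      simp only [elefLoopA, if_neg (by omega : ¬ a = 1), if_pos han,
        List.foldl_cons, List.foldl_nil, stepB, if_neg (by omega : ¬ a < n)]
      rw [join_snoc, hrep, incomodamA_pos a (by omega), hs]
      apply String.ext
      simp
    · -- middle verse: i < n, both lines are appended
      have han : a ≠ n := by omega
      have haln : a < n := by omega
      rw [show a + ((k + 1 : Nat) : Int) = (a + 1) + (k : Int) by push_cast; ring,
        PySem.List.pyRange_one_cons (by omega)]
      simp only [elefLoopA, if_neg (by omega : ¬ a = 1), if_neg han,
        List.foldl_cons, stepB, if_pos haln]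
      rw [ih n (a + 1)
          (s ++ "\n" ++ PySem.Int.toStr a ++ " elefantes " ++ incomodamA a false "" ++ "muito mais"
             ++ "\n" ++ PySem.Int.toStr a ++ " elefantes " ++ incomodamA 1 false "" ++ "muita gente")
          (inc ++ "incomodam ")
          (parts ++ ["\n" ++ PySem.Int.toStr a ++ " elefantes " ++ (inc ++ "incomodam ") ++ "muito mais"]
                 ++ ["\n" ++ PySem.Int.toStr a ++ " elefantes incomodam muita gente"])
          (by omega) (by omega) ?_ ?_]
      · rw [join_snoc, join_snoc, hs,
          incomodamA_pos a (by omega), incomodamA_pos 1 (by omega), hrep]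
        apply String.ext
        simp [rep]
      · rw [hrep]; congr 1; omega

theorem elefantes_eq (n : Int) (ready : Bool) (frase : String) :
    elefantes n ready frase = elefantes_alt n ready frase := by
  cases ready with
  | true => rw [elefantes_true]; simp [elefantes_alt]
  | false =>
    by_cases hn : n < 1
    · rw [elefantes]
      simp [hn, elefantes_alt, elefantes_true, incomodamA_zero]
    · have hA : elefantes n false frase
          = elefLoopA n (PySem.List.pyRange 1 (n + 1) 1) frase := by
        rw [elefantes]; simp [hn, elefantes_true]
      have hB : elefantes_alt n false frase
          = PySem.Str.join "" (((PySem.List.pyRange 2 (n + 1) 1).foldl (stepB n)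
              ("incomodam ", [frase, "Um elefante incomoda muita gente"])).2) := by
        simp [elefantes_alt, hn]
      rw [hA, hB, PySem.List.pyRange_one_cons (by omega)]
      have h12 : (1 : Int) + 1 = 2 := rfl
      rw [h12]
      simp only [elefLoopA, if_true]
      rw [show (n + 1 : Int) = 2 + (((n - 1).toNat : Nat) : Int) by omega]
      exact loop_eq (n - 1).toNat n 2 _ _ _ (by omega) (by omega)
        ((join_pair _ _).symm)
        (by have h1 : ((2 : Int) - 1).toNat = 1 := by omega
            rw [h1]; apply String.ext; simp [rep])

-- ===== VERDICT (by name: the statement is the Claim_ definition above) =====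
theorem elefantes_spec : Claim_equal_elefantes := by
  intro n ready frase _
  exact elefantes_eq n ready frase
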